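-- pv_equiv track=rewrite | github.com/longmanT0x/Atlasengine | atlas/backend/app/decision/risk_analysis.py | analyze_regulatory_risks
-- ===== SOURCE A (Python) =====
-- from typing import List, Dict, Any
--
-- def analyze_regulatory_risks(
--     regulatory_facts: List[Dict[str, Any]]
-- ) -> List[str]:
--     """
--     Analyze regulatory-specific risks from extracted data.
--
--     Args:
--         regulatory_facts: List of regulatory facts
--
--     Returns:
--         List of specific regulatory risk statements
--     """
--     risks = []
--
--     if not regulatory_facts:
--         risks.append(
--             "No regulatory mentions found - regulatory requirements may be unknown or unassessed"
--         )
--         return risks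
--
--     # Analyze regulatory mentions
--     regulatory_mentions = [f.get('value', '') for f in regulatory_facts]
--     contexts = [f.get('context_sentence', '').lower() for f in regulatory_facts]
--
--     # Check for specific regulatory agencies
--     agencies = {
--         'FDA': 'FDA',
--         'SEC': 'SEC',
--         'FTC': 'FTC',
--         'EPA': 'EPA',
--         'GDPR': 'GDPR',
--         'HIPAA': 'HIPAA',
--         'PCI': 'PCI',
--         'SOC': 'SOC'
--     }
--
--     found_agencies = []
--     for agency_key, agency_name in agencies.items():
--         if any(agency_key.lower() in mention.lower() or agency_key.lower() in ctx
--                for mention, ctx in zip(regulatory_mentions, contexts)):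
--             found_agencies.append(agency_name)
--
--     if found_agencies:
--         risks.append(
--             f"Regulatory oversight identified: {', '.join(found_agencies)} - "
--             f"compliance requirements may be significant"
--         )
--
--     # Check for compliance/approval language
--     compliance_keywords = ['approval', 'compliance', 'regulation', 'license', 'permit']
--     compliance_mentions = []
--     for ctx in contexts:
--         for keyword in compliance_keywords:
--             if keyword in ctx:
--                 compliance_mentions.append(keyword)
--                 break
--
--     if compliance_mentions:
--         risks.append(
--             f"Multiple regulatory requirements mentioned ({len(compliance_mentions)}) - "
--             f"may require significant compliance effort and time"
--         )
--
--     # Check for restrictive language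
--     restrictive_keywords = ['restrict', 'prohibit', 'ban', 'limit', 'require']
--     restrictive_mentions = []
--     for ctx in contexts:
--         for keyword in restrictive_keywords:
--             if keyword in ctx:
--                 restrictive_mentions.append(keyword)
--                 break
--
--     if restrictive_mentions:
--         risks.append(
--             f"Restrictive regulatory language found - may limit market entry or operations"
--         )
--
--     return risks
-- ===== SOURCE B (Python) =====
-- AGENCIES = ('FDA', 'SEC', 'FTC', 'EPA', 'GDPR', 'HIPAA', 'PCI', 'SOC')
-- COMPLIANCE_KEYWORDS = ('approval', 'compliance', 'regulation', 'license', 'permit')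
-- RESTRICTIVE_KEYWORDS = ('restrict', 'prohibit', 'ban', 'limit', 'require')
--
--
-- def analyze_regulatory_risks(regulatory_facts):
--     if not regulatory_facts:
--         return [
--             "No regulatory mentions found - regulatory requirements may be unknown or unassessed"
--         ]
--
--     # Single pass over the facts, maintaining all three pieces of state.
--     seen_agencies = set()
--     compliance_count = 0
--     restrictive = False
--     for fact in regulatory_facts:
--         mention = fact.get('value', '').lower()
--         ctx = fact.get('context_sentence', '').lower()
--         for agency in AGENCIES:
--             if agency.lower() in mention or agency.lower() in ctx:
--                 seen_agencies.add(agency)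
--         if any(k in ctx for k in COMPLIANCE_KEYWORDS):
--             compliance_count += 1
--         if not restrictive and any(k in ctx for k in RESTRICTIVE_KEYWORDS):
--             restrictive = True
--
--     risks = []
--     found_agencies = [a for a in AGENCIES if a in seen_agencies]
--     if found_agencies:
--         risks.append(
--             f"Regulatory oversight identified: {', '.join(found_agencies)} - "
--             f"compliance requirements may be significant"
--         )
--     if compliance_count:
--         risks.append(
--             f"Multiple regulatory requirements mentioned ({compliance_count}) - "
--             f"may require significant compliance effort and time"
--         )
--     if restrictive:
--         risks.append(
--             "Restrictive regulatory language found - may limit market entry or operations"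
--         )
--     return risks
-- ===== Notes on version B (the rewrite author's own statement) =====
-- stated objective: simpler
-- what changed: B replaces A's three separate scans (per-agency any-over-all-facts, plus two keyword loops over contexts) with a single pass over the facts that maintains a seen-agency set, a compliance counter and a restrictive flag, then emits the same three risk strings.
import Mathlib
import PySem

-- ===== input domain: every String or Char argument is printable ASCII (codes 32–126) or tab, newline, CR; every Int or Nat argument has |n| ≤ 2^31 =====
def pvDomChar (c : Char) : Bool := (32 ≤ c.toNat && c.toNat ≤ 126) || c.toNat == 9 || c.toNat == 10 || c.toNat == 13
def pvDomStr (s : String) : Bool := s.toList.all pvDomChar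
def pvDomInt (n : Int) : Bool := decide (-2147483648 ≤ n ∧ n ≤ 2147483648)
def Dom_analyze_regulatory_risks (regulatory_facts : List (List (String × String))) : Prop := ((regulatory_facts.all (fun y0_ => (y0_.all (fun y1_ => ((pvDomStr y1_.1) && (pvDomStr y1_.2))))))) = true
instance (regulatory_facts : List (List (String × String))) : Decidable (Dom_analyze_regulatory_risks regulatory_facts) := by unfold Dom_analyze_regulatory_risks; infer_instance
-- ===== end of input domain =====

-- B folds once over the facts, maintaining a seen-agency set, a compliance counter and a
-- restrictive flag, instead of A's three separate scans; same return value, objective: simpler.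


-- ===== PORT A =====

-- dict.get(k, d): first match in the association list, else the default
def dget (f : List (String × String)) (k d : String) : String :=
  match f.find? (fun p => p.1 == k) with
  | some p => p.2
  | none => d

-- inner 'for keyword in …: if keyword in ctx: append; break' — the first matching keyword
def firstKw : List String → String → Option String
  | [], _ => none
  | k :: rest, ctx => if PySem.Str.isIn k ctx then some k else firstKw rest ctx

def pvAgencies : List (String × String) :=
  [("FDA", "FDA"), ("SEC", "SEC"), ("FTC", "FTC"), ("EPA", "EPA"),
   ("GDPR", "GDPR"), ("HIPAA", "HIPAA"), ("PCI", "PCI"), ("SOC", "SOC")]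

def pvComplianceKws : List String := ["approval", "compliance", "regulation", "license", "permit"]
def pvRestrictiveKws : List String := ["restrict", "prohibit", "ban", "limit", "require"]

def analyze_regulatory_risks (regulatory_facts : List (List (String × String))) : List String :=
  if regulatory_facts = [] then
    [] ++ ["No regulatory mentions found - regulatory requirements may be unknown or unassessed"]
  else
    let regulatory_mentions := regulatory_facts.map (fun f => dget f "value" "")
    let contexts := regulatory_facts.map (fun f => PySem.Str.lower (dget f "context_sentence" ""))
    let found_agencies := pvAgencies.foldl (fun acc p =>
      if (regulatory_mentions.zip contexts).any (fun mc =>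
            PySem.Str.isIn (PySem.Str.lower p.1) (PySem.Str.lower mc.1) ||
            PySem.Str.isIn (PySem.Str.lower p.1) mc.2)
      then acc ++ [p.2] else acc) []
    let risks : List String := []
    let risks := if found_agencies ≠ [] then
      risks ++ ["Regulatory oversight identified: " ++ PySem.Str.join ", " found_agencies ++
                " - compliance requirements may be significant"] else risks
    let compliance_mentions := contexts.foldl (fun acc ctx =>
      match firstKw pvComplianceKws ctx with
      | some k => acc ++ [k]
      | none => acc) []
    let risks := if compliance_mentions ≠ [] then
      risks ++ ["Multiple regulatory requirements mentioned (" ++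
                PySem.Int.toStr (Int.ofNat compliance_mentions.length) ++
                ") - may require significant compliance effort and time"] else risks
    let restrictive_mentions := contexts.foldl (fun acc ctx =>
      match firstKw pvRestrictiveKws ctx with
      | some k => acc ++ [k]
      | none => acc) []
    let risks := if restrictive_mentions ≠ [] then
      risks ++ ["Restrictive regulatory language found - may limit market entry or operations"] else risks
    risks

-- ===== PORT B =====

def pvAgencyNames : List String := ["FDA", "SEC", "FTC", "EPA", "GDPR", "HIPAA", "PCI", "SOC"]

-- one fact's step of B's single pass: (seen set, compliance count, restrictive flag)
def pvStep (st : PySem.Set String × Int × Bool) (fact : List (String × String)) :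
    PySem.Set String × Int × Bool :=
  let mention := PySem.Str.lower (dget fact "value" "")
  let ctx := PySem.Str.lower (dget fact "context_sentence" "")
  let seen := pvAgencyNames.foldl (fun s a =>
    if PySem.Str.isIn (PySem.Str.lower a) mention || PySem.Str.isIn (PySem.Str.lower a) ctx
    then PySem.Set.add s a else s) st.1
  let c := if pvComplianceKws.any (fun k => PySem.Str.isIn k ctx) then st.2.1 + 1 else st.2.1
  let r := if !st.2.2 && pvRestrictiveKws.any (fun k => PySem.Str.isIn k ctx) then true else st.2.2
  (seen, c, r)

def analyze_regulatory_risks_alt (regulatory_facts : List (List (String × String))) : List String :=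
  if regulatory_facts = [] then
    ["No regulatory mentions found - regulatory requirements may be unknown or unassessed"]
  else
    let st := regulatory_facts.foldl pvStep (PySem.Set.empty, 0, false)
    let found_agencies := pvAgencyNames.filter (fun a => PySem.Set.contains st.1 a)
    (if found_agencies ≠ [] then
      ["Regulatory oversight identified: " ++ PySem.Str.join ", " found_agencies ++
       " - compliance requirements may be significant"] else []) ++
    (if st.2.1 ≠ 0 then
      ["Multiple regulatory requirements mentioned (" ++ PySem.Int.toStr st.2.1 ++
       ") - may require significant compliance effort and time"] else []) ++
    (if st.2.2 then
      ["Restrictive regulatory language found - may limit market entry or operations"] else [])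

-- ===== PRECONDITION & SPEC =====
def Spec_analyze_regulatory_risks (regulatory_facts : List (List (String × String))) (out : List String) : Prop := out = analyze_regulatory_risks_alt regulatory_facts
instance (regulatory_facts : List (List (String × String))) (out : List String) : Decidable (Spec_analyze_regulatory_risks regulatory_facts out) := by unfold Spec_analyze_regulatory_risks; infer_instance

-- ===== CLAIM (what is proved, stated in full; the proofs are below) =====
def Claim_equal_analyze_regulatory_risks : Prop := ∀ (regulatory_facts : List (List (String × String))), Dom_analyze_regulatory_risks regulatory_facts → Spec_analyze_regulatory_risks regulatory_facts (analyze_regulatory_risks regulatory_facts)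

-- ===== LEMMAS AND PROOFS =====

-- the per-fact match predicates the proofs reason about
def pvMatch (a : String) (f : List (String × String)) : Bool :=
  PySem.Str.isIn (PySem.Str.lower a) (PySem.Str.lower (dget f "value" "")) ||
  PySem.Str.isIn (PySem.Str.lower a) (PySem.Str.lower (dget f "context_sentence" ""))

def pvKwHit (kws : List String) (f : List (String × String)) : Bool :=
  kws.any (fun k => PySem.Str.isIn k (PySem.Str.lower (dget f "context_sentence" "")))

-- B's per-fact agency update, phrased with pvMatch (definitionally pvStep's first component)
def pvAddAg (f : List (String × String)) (s : PySem.Set String) : PySem.Set String :=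
  pvAgencyNames.foldl (fun s a => if pvMatch a f then PySem.Set.add s a else s) s

theorem firstKw_isSome (kws : List String) (ctx : String) :
    (firstKw kws ctx).isSome = kws.any (fun k => PySem.Str.isIn k ctx) := by
  induction kws with
  | nil => rfl
  | cons k rest ih =>
    simp only [firstKw, List.any_cons]
    by_cases h : PySem.Str.isIn k ctx = true
    · rw [if_pos h, h]; rfl
    · rw [if_neg h, ih, (Bool.not_eq_true _).mp h, Bool.false_or]

theorem kwFold_length (kws : List String) (ctxs : List String) (acc : List String) :
    (ctxs.foldl (fun acc ctx =>
      match firstKw kws ctx with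
      | some k => acc ++ [k]
      | none => acc) acc).length
    = acc.length + ctxs.countP (fun ctx => (firstKw kws ctx).isSome) := by
  induction ctxs generalizing acc with
  | nil => simp
  | cons c rest ih =>
    simp only [List.foldl_cons, List.countP_cons]
    rcases h : firstKw kws c with _ | k <;> simp [h, ih] <;> omega

theorem mem_fold_addif (p : String → Bool) (names : List String) (s : PySem.Set String) (a : String) :
    a ∈ names.foldl (fun s b => if p b then PySem.Set.add s b else s) s
    ↔ a ∈ s ∨ (a ∈ names ∧ p a = true) := by
  induction names generalizing s with
  | nil => simp
  | cons b rest ih =>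
    simp only [List.foldl_cons]
    by_cases h : p b = true
    · rw [if_pos h, ih]
      simp only [PySem.Set.mem_add, List.mem_cons]
      constructor
      · rintro ((hs | rfl) | ⟨hm, hp⟩)
        · exact Or.inl hs
        · exact Or.inr ⟨Or.inl rfl, h⟩
        · exact Or.inr ⟨Or.inr hm, hp⟩
      · rintro (hs | ⟨(rfl | hm), hp⟩)
        · exact Or.inl (Or.inl hs)
        · exact Or.inl (Or.inr rfl)
        · exact Or.inr ⟨hm, hp⟩
    · rw [if_neg h, ih]
      simp only [List.mem_cons]
      constructor
      · rintro (hs | ⟨hm, hp⟩)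
        · exact Or.inl hs
        · exact Or.inr ⟨Or.inr hm, hp⟩
      · rintro (hs | ⟨(rfl | hm), hp⟩)
        · exact Or.inl hs
        · exact absurd hp h
        · exact Or.inr ⟨hm, hp⟩

-- B's fold, characterised: seen set, counter value, flag value
theorem foldB_eq (facts : List (List (String × String)))
    (s : PySem.Set String) (c : Int) (r : Bool) :
    facts.foldl pvStep (s, c, r)
    = (facts.foldl (fun s f => pvAddAg f s) s,
       c + (facts.countP (pvKwHit pvComplianceKws) : Int),
       r || facts.any (pvKwHit pvRestrictiveKws)) := by
  induction facts generalizing s c r with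
  | nil => simp
  | cons f rest ih =>
    simp only [List.foldl_cons, List.countP_cons, List.any_cons]
    have hstep : pvStep (s, c, r) f
        = (pvAddAg f s,
           (if pvKwHit pvComplianceKws f then c + 1 else c),
           (if !r && pvKwHit pvRestrictiveKws f then true else r)) := rfl
    rw [hstep, ih]
    refine Prod.ext rfl (Prod.ext ?_ ?_)
    · by_cases h : pvKwHit pvComplianceKws f = true <;> simp [h] <;> omega
    · by_cases h : pvKwHit pvRestrictiveKws f = true <;> cases r <;> simp [h]

theorem mem_seen_fold (facts : List (List (String × String))) (s : PySem.Set String) (a : String) :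
    a ∈ facts.foldl (fun s f => pvAddAg f s) s
    ↔ a ∈ s ∨ (a ∈ pvAgencyNames ∧ facts.any (pvMatch a) = true) := by
  induction facts generalizing s with
  | nil => simp
  | cons f rest ih =>
    simp only [List.foldl_cons, List.any_cons]
    rw [ih]
    unfold pvAddAg
    rw [mem_fold_addif]
    constructor
    · rintro ((hs | ⟨hm, hp⟩) | ⟨hm, hp⟩)
      · exact Or.inl hs
      · exact Or.inr ⟨hm, by simp [hp]⟩
      · exact Or.inr ⟨hm, by simp [hp]⟩
    · rintro (hs | ⟨hm, hp⟩)
      · exact Or.inl (Or.inl hs)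
      · rw [Bool.or_eq_true] at hp
        rcases hp with h | h
        · exact Or.inl (Or.inr ⟨hm, h⟩)
        · exact Or.inr ⟨hm, h⟩

theorem anyZip_eq (facts : List (List (String × String))) (a : String) :
    ((facts.map (fun f => dget f "value" "")).zip
      (facts.map (fun f => PySem.Str.lower (dget f "context_sentence" "")))).any (fun mc =>
        PySem.Str.isIn (PySem.Str.lower a) (PySem.Str.lower mc.1) ||
        PySem.Str.isIn (PySem.Str.lower a) mc.2)
    = facts.any (pvMatch a) := by
  rw [List.zip_map']
  rw [List.any_map]
  rfl

-- A's found-agencies fold equals the matching names filtered in dict order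
theorem foundA_eq (facts : List (List (String × String))) :
    pvAgencies.foldl (fun acc p =>
      if ((facts.map (fun f => dget f "value" "")).zip
          (facts.map (fun f => PySem.Str.lower (dget f "context_sentence" "")))).any (fun mc =>
            PySem.Str.isIn (PySem.Str.lower p.1) (PySem.Str.lower mc.1) ||
            PySem.Str.isIn (PySem.Str.lower p.1) mc.2)
      then acc ++ [p.2] else acc) []
    = pvAgencyNames.filter (fun a => facts.any (pvMatch a)) := by
  rw [PySem.List.foldl_append_if]
  have hag : pvAgencies = pvAgencyNames.map (fun a => (a, a)) := by decide
  rw [hag, List.filter_map, List.map_map]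
  simp only [List.nil_append, Function.comp_def]
  have hmap : (fun a : String => ((a, a) : String × String).2) = fun a => a := rfl
  rw [show (List.map (fun a : String => ((a, a) : String × String).2)
        = List.map (id : String → String)) from rfl, List.map_id]
  congr 1
  funext a
  exact anyZip_eq facts a

theorem analyze_regulatory_risks_eq_alt (facts : List (List (String × String))) :
    analyze_regulatory_risks facts = analyze_regulatory_risks_alt facts := by
  by_cases hnil : facts = []
  · simp [analyze_regulatory_risks, analyze_regulatory_risks_alt, hnil]
  · have hfound : (pvAgencyNames.filter (fun a =>
        PySem.Set.contains (facts.foldl (fun s f => pvAddAg f s) PySem.Set.empty) a))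
        = pvAgencyNames.filter (fun a => facts.any (pvMatch a)) := by
      apply List.filter_congr
      intro a ha
      have hm := mem_seen_fold facts PySem.Set.empty a
      by_cases h : facts.any (pvMatch a) = true
      · rw [h]
        exact (PySem.Set.contains_iff _ _).mpr (hm.mpr (Or.inr ⟨ha, h⟩))
      · rw [(Bool.not_eq_true _).mp h, ← Bool.not_eq_true]
        intro hc
        rcases hm.mp ((PySem.Set.contains_iff _ _).mp hc) with hs | ⟨_, hp⟩
        · simp [PySem.Set.empty] at hs
        · exact h hp
    have hclen : ∀ kws : List String,
        ((facts.map (fun f => PySem.Str.lower (dget f "context_sentence" ""))).foldl (fun acc ctx =>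
          match firstKw kws ctx with
          | some k => acc ++ [k]
          | none => acc) []).length = facts.countP (pvKwHit kws) := by
      intro kws
      rw [kwFold_length]
      simp only [List.length_nil, Nat.zero_add, List.countP_map]
      apply List.countP_congr
      intro f _
      rw [Function.comp_apply, firstKw_isSome]
      rfl
    have hcnonnil : ∀ kws : List String,
        (((facts.map (fun f => PySem.Str.lower (dget f "context_sentence" ""))).foldl (fun acc ctx =>
          match firstKw kws ctx with
          | some k => acc ++ [k]
          | none => acc) []) ≠ []) ↔ facts.countP (pvKwHit kws) ≠ 0 := by
      intro kws
      rw [Ne, Ne, ← List.length_eq_zero_iff, hclen]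
    have hany : ∀ kws : List String,
        facts.any (pvKwHit kws) = true ↔ facts.countP (pvKwHit kws) ≠ 0 := by
      intro kws
      rw [List.any_eq_true, ← List.countP_pos_iff]
      omega
    simp only [analyze_regulatory_risks, analyze_regulatory_risks_alt, if_neg hnil]
    rw [foldB_eq, foundA_eq, hfound]
    simp only [Bool.false_or, zero_add, Int.ofNat_eq_natCast, hclen, hcnonnil, hany,
      Nat.cast_ne_zero]
    by_cases h1 : pvAgencyNames.filter (fun a => facts.any (pvMatch a)) ≠ [] <;>
      by_cases h2 : facts.countP (pvKwHit pvComplianceKws) ≠ 0 <;>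
      by_cases h3 : facts.countP (pvKwHit pvRestrictiveKws) ≠ 0 <;>
      simp [h1, h2, h3]

-- ===== VERDICT (by name: the statement is the Claim_ definition above) =====
theorem analyze_regulatory_risks_spec : Claim_equal_analyze_regulatory_risks := by
  intro facts _
  unfold Spec_analyze_regulatory_risks
  exact analyze_regulatory_risks_eq_alt facts
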